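-- pv_equiv track=rewrite | github.com/raffay2001/PYTHON-DATA-STRUCTURES | LABS/LAB_5.py | retrieveTriDiagonal
-- ===== SOURCE A (Python) =====
-- def retrieveTriDiagonal(U):
--     B = []
--     count = 0
--     # for n
--     n = int((len(U)+2)/3)
--     for i in range(n):
--         lst = []
--         for j in range(n):
--             if i == 0 and j in [0,1]:
--                 lst.append(U[count])
--                 count += 1
--             elif i == n-1 and j in [n-1, n-2]:
--                 lst.append(U[count])
--                 count += 1
--             elif j >= i-1 and j <= i+1:
--                 lst.append(U[count])
--                 count += 1
--             else:
--                 lst.append(0)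
--         B.append(lst)
--     return B
-- ===== SOURCE B (Python) =====
-- def retrieveTriDiagonal(U):
--     n = (len(U) + 2) // 3
--     B = []
--     for i in range(n):
--         lo = max(0, i - 1)
--         hi = min(n - 1, i + 1)
--         start = 0 if i == 0 else 3 * i - 1
--         B.append([0] * lo + U[start:start + (hi - lo + 1)] + [0] * (n - 1 - hi))
--     return B
-- ===== Notes on version B (the rewrite author's own statement) =====
-- stated objective: simpler
-- what changed: Replaces the stateful n-by-n per-cell branch/counter loop by a per-row closed form: each row is lo zeros ++ a slice of U starting at the arithmetic offset (0 or 3*i-1) ++ trailing zeros, with no counter and no per-cell conditionals.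
import Mathlib
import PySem

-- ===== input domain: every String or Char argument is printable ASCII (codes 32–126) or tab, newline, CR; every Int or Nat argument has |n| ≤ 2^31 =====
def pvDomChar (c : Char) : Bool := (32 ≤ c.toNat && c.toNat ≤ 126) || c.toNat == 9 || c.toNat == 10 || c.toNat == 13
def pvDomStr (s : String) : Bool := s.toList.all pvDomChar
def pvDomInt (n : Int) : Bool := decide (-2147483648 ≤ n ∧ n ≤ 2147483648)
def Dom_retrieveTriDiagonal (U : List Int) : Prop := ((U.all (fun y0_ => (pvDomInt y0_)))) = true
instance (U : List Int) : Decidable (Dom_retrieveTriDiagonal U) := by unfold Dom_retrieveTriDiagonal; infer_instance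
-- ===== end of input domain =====

-- B rebuilds each row by a closed-form slice of U instead of A's per-cell branch-and-counter scan (objective: simpler).
-- ===== PORT A =====
-- Python's U[count] raises IndexError out of range; here n = (len(U)+2)//3 guarantees every
-- access is in range (proved in the lemmas below), so the total pyGetD with default 0 is exact.
-- int((len(U)+2)/3) is ported as floor division, exact for every list length.
def aStep (U : List Int) (n i : Int) (st : List Int × Int) (j : Int) : List Int × Int :=
  if i = 0 ∧ (j = 0 ∨ j = 1) then (st.1 ++ [PySem.List.pyGetD U st.2 0], st.2 + 1)
  else if i = n - 1 ∧ (j = n - 1 ∨ j = n - 2) then (st.1 ++ [PySem.List.pyGetD U st.2 0], st.2 + 1)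
  else if i - 1 ≤ j ∧ j ≤ i + 1 then (st.1 ++ [PySem.List.pyGetD U st.2 0], st.2 + 1)
  else (st.1 ++ [0], st.2)

def aRow (U : List Int) (n i count0 : Int) : List Int × Int :=
  (PySem.List.pyRange 0 n 1).foldl (aStep U n i) ([], count0)

def retrieveTriDiagonal (U : List Int) : List (List Int) :=
  let n : Int := PySem.Int.floordiv ((U.length : Int) + 2) 3
  ((PySem.List.pyRange 0 n 1).foldl
    (fun (st : List (List Int) × Int) i =>
      let r := aRow U n i st.2
      (st.1 ++ [r.1], r.2)) ([], 0)).1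

-- ===== PORT B =====
def bRow (U : List Int) (n i : Int) : List Int :=
  let lo := max 0 (i - 1)
  let hi := min (n - 1) (i + 1)
  let start := if i = 0 then (0 : Int) else 3 * i - 1
  PySem.List.pyRepeat [(0 : Int)] lo
    ++ PySem.List.slice U (some start) (some (start + (hi - lo + 1)))
    ++ PySem.List.pyRepeat [(0 : Int)] (n - 1 - hi)

def retrieveTriDiagonal_alt (U : List Int) : List (List Int) :=
  let n : Int := PySem.Int.floordiv ((U.length : Int) + 2) 3
  (PySem.List.pyRange 0 n 1).foldl (fun B i => B ++ [bRow U n i]) []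

-- ===== PRECONDITION & SPEC =====
def Spec_retrieveTriDiagonal (U : List Int) (out : List (List Int)) : Prop := out = retrieveTriDiagonal_alt U
instance (U : List Int) (out : List (List Int)) : Decidable (Spec_retrieveTriDiagonal U out) := by unfold Spec_retrieveTriDiagonal; infer_instance

-- ===== CLAIM (what is proved, stated in full; the proofs are below) =====
def Claim_equal_retrieveTriDiagonal : Prop := ∀ (U : List Int), Dom_retrieveTriDiagonal U → Spec_retrieveTriDiagonal U (retrieveTriDiagonal U)

-- ===== LEMMAS AND PROOFS =====

-- A run of j's on which no branch of A's if-chain fires appends only zeros and keeps the counter.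
theorem aStep_zeros_run (U : List Int) (n i : Int) (js : List Int) (acc : List Int) (c : Int)
    (h : ∀ j ∈ js, ¬(i = 0 ∧ (j = 0 ∨ j = 1)) ∧ ¬(i = n - 1 ∧ (j = n - 1 ∨ j = n - 2)) ∧ ¬(i - 1 ≤ j ∧ j ≤ i + 1)) :
    js.foldl (aStep U n i) (acc, c) = (acc ++ List.replicate js.length 0, c) := by
  induction js generalizing acc with
  | nil => simp
  | cons j js ih =>
    obtain ⟨h1, h2, h3⟩ := h j (by simp)
    simp only [List.foldl_cons, aStep, if_neg h1, if_neg h2, if_neg h3]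
    rw [ih (acc ++ [0]) (fun j hj => h j (by simp [hj]))]
    simp [List.replicate_succ]

-- A run of j's on each of which some branch fires consumes consecutive elements of U.
theorem aStep_take_run (U : List Int) (n i : Int) (js : List Int) (acc : List Int) (c : Int)
    (h : ∀ j ∈ js, (i = 0 ∧ (j = 0 ∨ j = 1)) ∨ (i = n - 1 ∧ (j = n - 1 ∨ j = n - 2)) ∨ (i - 1 ≤ j ∧ j ≤ i + 1)) :
    js.foldl (aStep U n i) (acc, c)
      = (acc ++ (List.range js.length).map (fun (k : Nat) => PySem.List.pyGetD U (c + (k : Int)) 0), c + js.length) := by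
  induction js generalizing acc c with
  | nil => simp
  | cons j js ih =>
    have hstep : aStep U n i (acc, c) j = (acc ++ [PySem.List.pyGetD U c 0], c + 1) := by
      rcases h j (by simp) with h1 | h2 | h3
      · simp [aStep, h1]
      · by_cases h1 : i = 0 ∧ (j = 0 ∨ j = 1) <;> simp [aStep, h1, h2]
      · by_cases h1 : i = 0 ∧ (j = 0 ∨ j = 1)
        · simp [aStep, h1]
        · by_cases h2 : i = n - 1 ∧ (j = n - 1 ∨ j = n - 2) <;> simp [aStep, h1, h2, h3]
    simp only [List.foldl_cons, hstep]
    rw [ih (acc ++ [PySem.List.pyGetD U c 0]) (c + 1) (fun j hj => h j (by simp [hj]))]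
    have hmap : (List.range (js.length + 1)).map (fun (k : Nat) => PySem.List.pyGetD U (c + (k : Int)) 0)
        = PySem.List.pyGetD U c 0 :: (List.range js.length).map (fun (k : Nat) => PySem.List.pyGetD U (c + 1 + (k : Int)) 0) := by
      rw [List.range_succ_eq_map, List.map_cons, List.map_map]
      refine congrArg₂ _ (by norm_num) ?_
      apply List.map_congr_left; intro k _
      simp only [Function.comp_apply]
      congr 1
      push_cast; ring
    refine Prod.ext ?_ (by simp; omega)
    simp only [List.length_cons, hmap]
    simp

-- Consecutive in-range reads of U are a slice of U.
theorem map_pyGetD_eq_slice (U : List Int) (s cells : Int) (hs : 0 ≤ s) (hc : 0 ≤ cells)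
    (hle : s + cells ≤ (U.length : Int)) :
    (List.range cells.toNat).map (fun (k : Nat) => PySem.List.pyGetD U (s + (k : Int)) 0)
      = PySem.List.slice U (some s) (some (s + cells)) := by
  rw [PySem.List.slice_toNat U hs (by omega)]
  apply List.ext_getElem
  · simp; omega
  · intro k hk1 hk2
    simp only [List.getElem_map, List.getElem_range, List.getElem_take, List.getElem_drop]
    rw [PySem.List.pyGetD_eq_getElem U 0 (by simp at hk1; omega)
      (by simp at hk1; omega)]
    congr 1
    simp at hk1; omega

-- The inner loop of A over one row i (0 ≤ i < n, n = matrix size) yields the band row.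
theorem aRow_eq (U : List Int) (N : Nat) (i c : Int) (h0 : 0 ≤ i) (hN : i < (N : Int)) :
    aRow U (N : Int) i c
      = (List.replicate (max 0 (i - 1)).toNat 0
          ++ (List.range ((min ((N : Int) - 1) (i + 1)) - (max 0 (i - 1)) + 1).toNat).map
              (fun (k : Nat) => PySem.List.pyGetD U (c + (k : Int)) 0)
          ++ List.replicate ((N : Int) - 1 - (min ((N : Int) - 1) (i + 1))).toNat 0,
         c + ((min ((N : Int) - 1) (i + 1)) - (max 0 (i - 1)) + 1)) := by
  have hlo : (0 : Int) ≤ max 0 (i - 1) := by omega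
  have hlohi : max 0 (i - 1) ≤ min ((N : Int) - 1) (i + 1) + 1 := by omega
  have hhiN : min ((N : Int) - 1) (i + 1) + 1 ≤ (N : Int) := by omega
  unfold aRow
  rw [PySem.List.pyRange_one_append 0 (max 0 (i - 1)) (N : Int) hlo (by omega),
      PySem.List.pyRange_one_append (max 0 (i - 1)) (min ((N : Int) - 1) (i + 1) + 1) (N : Int) hlohi hhiN,
      List.foldl_append, List.foldl_append]
    -- leading zeros
  rw [aStep_zeros_run U (N : Int) i _ [] c (by
      intro j hj
      rw [PySem.List.mem_pyRange_one] at hj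
      refine ⟨?_, ?_, ?_⟩ <;> intro hcon <;> omega)]
    -- band cells
  rw [aStep_take_run U (N : Int) i _ _ c (by
      intro j hj
      rw [PySem.List.mem_pyRange_one] at hj
      right; right; omega)]
    -- trailing zeros
  rw [aStep_zeros_run U (N : Int) i _ _ _ (by
      intro j hj
      rw [PySem.List.mem_pyRange_one] at hj
      refine ⟨?_, ?_, ?_⟩ <;> intro hcon <;> omega)]
  rw [PySem.List.length_pyRange_one, PySem.List.length_pyRange_one, PySem.List.length_pyRange_one]
  refine Prod.ext ?_ ?_
  · simp only [List.nil_append, List.append_assoc]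
    congr 3 <;> [skip; skip; skip] <;> congr 1 <;> omega
  · simp; omega

-- Outer loop: processing rows i..N-1 with the correct incoming counter appends exactly B's rows.
theorem outer_run (U : List Int) (N : Nat) (hlen : 3 * (N : Int) - 2 ≤ (U.length : Int)) :
    ∀ (m i : Nat) (acc : List (List Int)) (c : Int), i + m = N →
      (i < N → c = (if (i : Int) = 0 then 0 else 3 * (i : Int) - 1)) →
      ((PySem.List.pyRange (i : Int) (N : Int) 1).foldl
        (fun (st : List (List Int) × Int) j =>
          (st.1 ++ [(aRow U (N : Int) j st.2).1], (aRow U (N : Int) j st.2).2)) (acc, c)).1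
        = acc ++ (PySem.List.pyRange (i : Int) (N : Int) 1).map (bRow U (N : Int)) := by
  intro m
  induction m with
  | zero =>
    intro i acc c hiN _
    rw [PySem.List.pyRange_one_eq_nil (by omega)]
    simp
  | succ m ih =>
    intro i acc c hiN hc
    have hiltN : i < N := by omega
    have hc' := hc hiltN
    rw [PySem.List.pyRange_one_cons (by exact_mod_cast hiltN)]
    simp only [List.foldl_cons, List.map_cons]
    rw [aRow_eq U N (i : Int) c (by omega) (by exact_mod_cast hiltN)]
    have hcast : ((i : Int) + 1) = ((i + 1 : Nat) : Int) := by push_cast; ring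
    rw [hcast]
    rw [ih (i + 1) (acc ++ [_]) _ (by omega) (by
      intro hi1
      rw [hc']
      have : ¬ ((i : Int) + 1 = 0) := by omega
      split_ifs with h1 h2 <;> push_cast at * <;> omega)]
    have hband : c + ((min ((N : Int) - 1) ((i : Int) + 1)) - (max 0 ((i : Int) - 1)) + 1) ≤ (U.length : Int) := by
      rw [hc']; split_ifs with h <;> omega
    have hc0 : 0 ≤ c := by rw [hc']; split_ifs with h <;> omega
    simp only [List.append_assoc, List.singleton_append]
    congr 2
    -- the produced row equals bRow
    push_cast
    rw [map_pyGetD_eq_slice U c _ hc0 (by omega) hband]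
    simp only [bRow, PySem.List.pyRepeat_singleton]
    have hstart : (if (i : Int) = 0 then (0 : Int) else 3 * (i : Int) - 1) = c := hc'.symm
    rw [hstart, List.append_assoc]

-- Outer loop specialised to the whole matrix.
theorem outer_run0 (U : List Int) (N : Nat) (hlen : 3 * (N : Int) - 2 ≤ (U.length : Int)) :
    ((PySem.List.pyRange 0 (N : Int) 1).foldl
      (fun (st : List (List Int) × Int) j =>
        (st.1 ++ [(aRow U (N : Int) j st.2).1], (aRow U (N : Int) j st.2).2)) ([], 0)).1
      = (PySem.List.pyRange 0 (N : Int) 1).map (bRow U (N : Int)) := by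
  have h := outer_run U N hlen N 0 [] 0 (by omega) (by intro _; norm_num)
  simpa using h

-- n = (len+2)//3 is nonnegative and the band has at most len cells.
theorem n_facts (L : Nat) :
    0 ≤ PySem.Int.floordiv ((L : Int) + 2) 3 ∧
    3 * PySem.Int.floordiv ((L : Int) + 2) 3 ≤ (L : Int) + 2 := by
  rw [PySem.Int.floordiv_eq_ediv_of_pos (by omega)]
  omega

-- ===== VERDICT (by name: the statement is the Claim_ definition above) =====
theorem retrieveTriDiagonal_spec : Claim_equal_retrieveTriDiagonal := by
  intro U _
  unfold Spec_retrieveTriDiagonal retrieveTriDiagonal retrieveTriDiagonal_alt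
  simp only []
  set n : Int := PySem.Int.floordiv ((U.length : Int) + 2) 3 with hn
  obtain ⟨hn0, hn3⟩ := n_facts U.length
  rw [← hn] at hn0 hn3
  have hN : n = (n.toNat : Int) := by omega
  rw [hN]
  rw [outer_run0 U n.toNat (by omega)]
  rw [PySem.List.foldl_append_singleton_eq_map]
  simp
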